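-- pv_equiv track=rewrite | github.com/elavallee/AdventOfCode2020 | advent2020.py | getUniqueBags
-- ===== SOURCE A (Python) =====
-- def getUniqueBags(bags, bag='shiny gold', uniqueBags=None) -> set:
--     if uniqueBags is None: uniqueBags = set()
--     if bag in bags:
--         for b in bags[bag]:
--             uniqueBags.add(b)
--             uniqueBags = getUniqueBags(bags, b, uniqueBags)
--         return uniqueBags
--     else:
--         return uniqueBags
-- ===== SOURCE B (Python) =====
-- def getUniqueBags(bags, bag='shiny gold', uniqueBags=None) -> set:
--     if uniqueBags is None:
--         uniqueBags = set()
--     seen = set()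
--     stack = list(reversed(bags.get(bag, [])))
--     while stack:
--         b = stack.pop()
--         if b in seen:
--             continue
--         seen.add(b)
--         uniqueBags.add(b)
--         stack.extend(reversed(bags.get(b, [])))
--     return uniqueBags
-- ===== Notes on version B (the rewrite author's own statement) =====
-- stated objective: alternative
-- what changed: A is unmemoised recursion that re-traverses shared subgraphs (and never terminates on cycles); B is an iterative explicit-stack DFS with a visited set so each bag is expanded at most once.
-- crash fix: On inputs with a cycle in the bag graph reachable from bag, A recurses forever (RecursionError) while B returns the finite set of reachable bags. — e.g. on getUniqueBags([("a", ["a"])], "a", none): A raises RecursionError, B returns ["a"]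
import Mathlib
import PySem

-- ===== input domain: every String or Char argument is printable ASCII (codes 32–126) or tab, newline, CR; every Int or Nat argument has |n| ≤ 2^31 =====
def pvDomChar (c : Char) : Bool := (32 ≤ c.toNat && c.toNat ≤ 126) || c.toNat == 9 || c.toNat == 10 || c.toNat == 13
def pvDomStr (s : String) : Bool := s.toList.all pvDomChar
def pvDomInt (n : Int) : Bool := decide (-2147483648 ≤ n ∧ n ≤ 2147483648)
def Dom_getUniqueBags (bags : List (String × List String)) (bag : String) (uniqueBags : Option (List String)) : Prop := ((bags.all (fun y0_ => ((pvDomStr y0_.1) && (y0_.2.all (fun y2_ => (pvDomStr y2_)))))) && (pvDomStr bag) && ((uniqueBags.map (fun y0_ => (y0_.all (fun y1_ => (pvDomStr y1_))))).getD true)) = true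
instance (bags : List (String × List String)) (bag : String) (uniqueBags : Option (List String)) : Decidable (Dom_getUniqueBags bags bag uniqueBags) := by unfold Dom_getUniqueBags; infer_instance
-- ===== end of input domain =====

-- B replaces A's unmemoised recursion (which re-traverses shared subgraphs and never terminates on cycles)
-- by an iterative explicit-stack DFS with a visited set, each bag expanded at most once;
-- return values agree on every input where A terminates (A mutates a passed-in uniqueBags set in place; B performs the same mutation).

-- ===== PORT A =====
-- Python A is unguarded recursion; the Nat argument is fuel making it total in Lean.
-- Under Pre_ (no cycle reachable from bag) recursion depth is at most bags.length + 1, so the fuel is never exhausted.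
def pvGoA (bags : List (String × List String)) : Nat → String → List String → List String
  | 0, _, res => res
  | n+1, b, res =>
    match (PySem.Dict.ofList bags).get? b with
    | some cs => cs.foldl (fun r c => pvGoA bags n c (PySem.Set.add r c)) res
    | none => res

def getUniqueBags (bags : List (String × List String)) (bag : String) (uniqueBags : Option (List String)) : List String :=
  pvGoA bags (bags.length + 1) bag (uniqueBags.getD [])

-- ===== PORT B =====
-- termination helpers for the while loop (cited by pvLoopB's decreasing_by)
theorem pvGetD_of_not_key (bags : List (String × List String)) (b : String)
    (h : b ∉ (PySem.Dict.ofList bags).keys) : (PySem.Dict.ofList bags).getD b [] = [] := by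
  have hn : (PySem.Dict.ofList bags).get? b = none :=
    (PySem.Dict.get?_eq_none_iff_not_mem_keys _ _).mpr h
  simp [PySem.Dict.getD_eq_get?_getD, hn]

theorem pvFilter_add_lt (keys seen : List String) (b : String)
    (hk : b ∈ keys) (hs : b ∉ seen) :
    (keys.filter (fun x => !(PySem.Set.contains (PySem.Set.add seen b) x))).length
      < (keys.filter (fun x => !(PySem.Set.contains seen x))).length := by
  have himp : ∀ x : String,
      (!(PySem.Set.contains (PySem.Set.add seen b) x)) = true → (!(PySem.Set.contains seen x)) = true := by
    intro x hx
    simp only [Bool.not_eq_true'] at hx ⊢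
    cases hcc : PySem.Set.contains seen x with
    | false => rfl
    | true =>
      have hmem : x ∈ PySem.Set.add seen b :=
        (PySem.Set.mem_add _ _ _).mpr (Or.inl ((PySem.Set.contains_iff _ _).mp hcc))
      rw [(PySem.Set.contains_iff _ _).mpr hmem] at hx
      cases hx
  have hsub : (keys.filter (fun x => !(PySem.Set.contains (PySem.Set.add seen b) x))).Sublist
      (keys.filter (fun x => !(PySem.Set.contains seen x))) :=
    List.monotone_filter_right keys himp
  refine Nat.lt_of_le_of_ne hsub.length_le ?_
  intro heq
  have heql := hsub.eq_of_length heq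
  have hbq : b ∈ keys.filter (fun x => !(PySem.Set.contains seen x)) := by
    refine List.mem_filter.mpr ⟨hk, ?_⟩
    simp only [Bool.not_eq_true']
    cases hcb : PySem.Set.contains seen b with
    | false => rfl
    | true => exact absurd ((PySem.Set.contains_iff _ _).mp hcb) hs
  rw [← heql] at hbq
  have h2 := (List.mem_filter.mp hbq).2
  have hmem : b ∈ PySem.Set.add seen b := (PySem.Set.mem_add _ _ _).mpr (Or.inr rfl)
  rw [(PySem.Set.contains_iff _ _).mpr hmem] at h2
  cases h2

theorem pvFilter_add_eq (keys seen : List String) (b : String) (hk : b ∉ keys) :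
    keys.filter (fun x => !(PySem.Set.contains (PySem.Set.add seen b) x))
      = keys.filter (fun x => !(PySem.Set.contains seen x)) := by
  apply List.filter_congr
  intro x hx
  have hxb : x ≠ b := fun h => hk (h ▸ hx)
  have : PySem.Set.contains (PySem.Set.add seen b) x = PySem.Set.contains seen x := by
    cases hc : PySem.Set.contains seen x with
    | true =>
      exact (PySem.Set.contains_iff _ _).mpr
        ((PySem.Set.mem_add _ _ _).mpr (Or.inl ((PySem.Set.contains_iff _ _).mp hc)))
    | false =>
      cases hc2 : PySem.Set.contains (PySem.Set.add seen b) x with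
      | false => rfl
      | true =>
        rcases (PySem.Set.mem_add _ _ _).mp ((PySem.Set.contains_iff _ _).mp hc2) with h | h
        · rw [(PySem.Set.contains_iff _ _).mpr h] at hc; cases hc
        · exact absurd h hxb
  rw [this]

-- the while loop: state = (seen, uniqueBags); the Lean stack is popped at the head, so Python's
-- pop-from-the-end with reversed extend (= children in order) is modelled by prepending the children in order.
def pvLoopB (bags : List (String × List String)) (stk : List String)
    (st : List String × List String) : List String × List String :=
  match stk with
  | [] => st
  | b :: stk' =>
    if PySem.Set.contains st.1 b then pvLoopB bags stk' st
    else pvLoopB bags ((PySem.Dict.ofList bags).getD b [] ++ stk')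
           (PySem.Set.add st.1 b, PySem.Set.add st.2 b)
termination_by
  ((((PySem.Dict.ofList bags).keys.filter (fun x => !(PySem.Set.contains st.1 x))).length, stk.length))
decreasing_by
  · exact Prod.Lex.right _ (Nat.lt_succ_self _)
  · rename_i hb
    by_cases hk : b ∈ (PySem.Dict.ofList bags).keys
    · exact Prod.Lex.left _ _ (pvFilter_add_lt _ _ _ hk
        (fun h => hb ((PySem.Set.contains_iff _ _).mpr h)))
    · rw [pvFilter_add_eq _ _ _ hk, pvGetD_of_not_key _ _ hk]
      exact Prod.Lex.right _ (Nat.lt_succ_self _)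

def getUniqueBags_alt (bags : List (String × List String)) (bag : String) (uniqueBags : Option (List String)) : List String :=
  (pvLoopB bags ((PySem.Dict.ofList bags).getD bag []) (PySem.Set.empty, uniqueBags.getD [])).2

-- ===== PRECONDITION & SPEC =====
def pvKeys (bags : List (String × List String)) : List String := (PySem.Dict.ofList bags).keys
def pvCh (bags : List (String × List String)) (b : String) : List String := (PySem.Dict.ofList bags).getD b []
-- keys all of whose key-children are already known to head only finite descent
def pvSafeStep (bags : List (String × List String)) (S : List String) : List String :=
  (pvKeys bags).filter (fun k => (pvCh bags k).all (fun c => S.contains c || !((pvKeys bags).contains c)))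
def pvSafe (bags : List (String × List String)) : Nat → List String
  | 0 => []
  | i+1 => pvSafeStep bags (pvSafe bags i)

-- Pre_ excludes exactly the inputs with a cycle reachable from bag through the bag graph,
-- on which Python A's unmemoised recursion never terminates (RecursionError).
def Pre_getUniqueBags (bags : List (String × List String)) (bag : String) (uniqueBags : Option (List String)) : Prop :=
  bag ∈ pvSafe bags (bags.length + 1) ∨ bag ∉ pvKeys bags
instance (bags : List (String × List String)) (bag : String) (uniqueBags : Option (List String)) : Decidable (Pre_getUniqueBags bags bag uniqueBags) := by unfold Pre_getUniqueBags; infer_instance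

def pvWitness_getUniqueBags : (List (String × List String)) × String × Option (List String) :=
  ([("shiny gold", ["dark red", "dark blue"]), ("dark red", ["dark blue"])], "shiny gold", none)

-- On inputs with a cycle reachable from bag, Python A raises RecursionError while B returns the finite set of reachable bags.
def Raises_getUniqueBags (bags : List (String × List String)) (bag : String) (uniqueBags : Option (List String)) : Prop :=
  bag ∈ pvKeys bags ∧ bag ∉ pvSafe bags (bags.length + 1)
instance (bags : List (String × List String)) (bag : String) (uniqueBags : Option (List String)) : Decidable (Raises_getUniqueBags bags bag uniqueBags) := by unfold Raises_getUniqueBags; infer_instance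
def pvRaiseWitness_getUniqueBags : (List (String × List String)) × String × Option (List String) :=
  ([("a", ["a"])], "a", none)
def pvRaiseWitnessOut_getUniqueBags : List String := ["a"]

def Spec_getUniqueBags (bags : List (String × List String)) (bag : String) (uniqueBags : Option (List String)) (out : List String) : Prop := out = getUniqueBags_alt bags bag uniqueBags
instance (bags : List (String × List String)) (bag : String) (uniqueBags : Option (List String)) (out : List String) : Decidable (Spec_getUniqueBags bags bag uniqueBags out) := by unfold Spec_getUniqueBags; infer_instance

-- ===== CLAIM (what is proved, stated in full; the proofs are below) =====
def Claim_equal_getUniqueBags : Prop := ∀ (bags : List (String × List String)) (bag : String) (uniqueBags : Option (List String)), Dom_getUniqueBags bags bag uniqueBags → Pre_getUniqueBags bags bag uniqueBags → Spec_getUniqueBags bags bag uniqueBags (getUniqueBags bags bag uniqueBags)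
def Claim_raises_getUniqueBags : Prop := (∀ (bags : List (String × List String)) (bag : String) (uniqueBags : Option (List String)), Dom_getUniqueBags bags bag uniqueBags → Raises_getUniqueBags bags bag uniqueBags → ¬ Pre_getUniqueBags bags bag uniqueBags) ∧ (Dom_getUniqueBags (pvRaiseWitness_getUniqueBags.1) (pvRaiseWitness_getUniqueBags.2.1) (pvRaiseWitness_getUniqueBags.2.2) ∧ Raises_getUniqueBags (pvRaiseWitness_getUniqueBags.1) (pvRaiseWitness_getUniqueBags.2.1) (pvRaiseWitness_getUniqueBags.2.2) ∧ getUniqueBags_alt (pvRaiseWitness_getUniqueBags.1) (pvRaiseWitness_getUniqueBags.2.1) (pvRaiseWitness_getUniqueBags.2.2) = pvRaiseWitnessOut_getUniqueBags)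

-- ===== LEMMAS AND PROOFS =====

-- reachability in ≥ 1 step through the bag graph
inductive pvReaches (bags : List (String × List String)) : String → String → Prop
  | base {b c : String} : c ∈ pvCh bags b → pvReaches bags b c
  | step {b c y : String} : c ∈ pvCh bags b → pvReaches bags c y → pvReaches bags b y

theorem pvReaches_snoc {bags : List (String × List String)} {x b c : String}
    (h : pvReaches bags x b) (hc : c ∈ pvCh bags b) : pvReaches bags x c := by
  induction h with
  | base h => exact pvReaches.step h (pvReaches.base hc)
  | step h _ ih => exact pvReaches.step h (ih hc)

theorem pvReaches_inv {bags : List (String × List String)} {b y : String}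
    (h : pvReaches bags b y) : ∃ c ∈ pvCh bags b, y = c ∨ pvReaches bags c y := by
  cases h with
  | base h => exact ⟨_, h, Or.inl rfl⟩
  | step h h2 => exact ⟨_, h, Or.inr h2⟩

def pvSafeAt (bags : List (String × List String)) (i : Nat) (x : String) : Prop :=
  x ∈ pvSafe bags i ∨ x ∉ pvKeys bags

theorem pvCh_of_not_key {bags : List (String × List String)} {x : String}
    (h : x ∉ pvKeys bags) : pvCh bags x = [] :=
  pvGetD_of_not_key bags x h

theorem pvSafeAt_child {bags : List (String × List String)} {i : Nat} {x c : String}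
    (h : pvSafeAt bags (i+1) x) (hc : c ∈ pvCh bags x) : pvSafeAt bags i c := by
  rcases h with h | h
  · simp only [pvSafe, pvSafeStep, List.mem_filter] at h
    rcases h with ⟨-, hall⟩
    have := (List.all_eq_true.mp hall) c hc
    rcases Bool.or_eq_true_iff.mp this with h1 | h1
    · exact Or.inl (by simpa using h1)
    · refine Or.inr ?_
      simp only [Bool.not_eq_eq_eq_not, Bool.not_true] at h1
      intro hm
      rw [List.contains_iff_mem.mpr hm] at h1
      cases h1
  · rw [pvCh_of_not_key h] at hc; cases hc

theorem pvSafe_mono {bags : List (String × List String)} :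
    ∀ (i : Nat) (x : String), x ∈ pvSafe bags i → x ∈ pvSafe bags (i+1) := by
  intro i
  induction i with
  | zero => intro x hx; cases hx
  | succ i ih =>
    intro x hx
    simp only [pvSafe, pvSafeStep, List.mem_filter] at hx ⊢
    refine ⟨hx.1, ?_⟩
    rw [List.all_eq_true] at hx ⊢
    intro c hc
    rcases Bool.or_eq_true_iff.mp (hx.2 c hc) with h | h
    · exact Bool.or_eq_true_iff.mpr (Or.inl (List.contains_iff_mem.mpr
        (ih c (List.contains_iff_mem.mp h))))
    · exact Bool.or_eq_true_iff.mpr (Or.inr h)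

theorem pvSafeAt_mono {bags : List (String × List String)} {i : Nat} {x : String}
    (h : pvSafeAt bags i x) : pvSafeAt bags (i+1) x := by
  rcases h with h | h
  · exact Or.inl (pvSafe_mono i x h)
  · exact Or.inr h

theorem pvSafeAt_acc {bags : List (String × List String)} :
    ∀ (i : Nat) (x : String), pvSafeAt bags i x → Acc (fun c b => c ∈ pvCh bags b) x := by
  intro i
  induction i with
  | zero =>
    intro x hx
    rcases hx with hx | hx
    · cases hx
    · exact Acc.intro _ (fun c hc => by rw [pvCh_of_not_key hx] at hc; cases hc)
  | succ i ih =>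
    intro x hx
    exact Acc.intro _ (fun c hc => ih c (pvSafeAt_child hx hc))

theorem pvReaches_trans {bags : List (String × List String)} {x y z : String}
    (h1 : pvReaches bags x y) (h2 : pvReaches bags y z) : pvReaches bags x z := by
  induction h1 with
  | base h => exact pvReaches.step h h2
  | step h _ ih => exact pvReaches.step h (ih h2)

theorem pvAcc_no_self {bags : List (String × List String)} {x : String}
    (h : Acc (fun c b => c ∈ pvCh bags b) x) : ¬ pvReaches bags x x := by
  induction h with
  | intro x hacc ih =>
    intro hx
    rcases pvReaches_inv hx with ⟨c, hc, hcase⟩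
    rcases hcase with rfl | hcx
    · exact ih _ hc (pvReaches.base hc)
    · exact ih _ hc (pvReaches_trans hcx (pvReaches.base hc))

-- 'black' nodes: everything reachable from x is already collected
def pvBlack (bags : List (String × List String)) (x : String) (res : List String) : Prop :=
  ∀ y, pvReaches bags x y → y ∈ res

theorem pvGoA_noop {bags : List (String × List String)} :
    ∀ (n : Nat) (b : String) (res : List String), pvBlack bags b res → pvGoA bags n b res = res := by
  intro n
  induction n with
  | zero => intro b res _; rfl
  | succ n ih =>
    intro b res hb
    show pvGoA bags (n+1) b res = res
    rw [pvGoA]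
    cases hg : (PySem.Dict.ofList bags).get? b with
    | none => rfl
    | some cs =>
      have hcs : pvCh bags b = cs := by simp [pvCh, PySem.Dict.getD_eq_get?_getD, hg]
      have : ∀ cs' : List String, (∀ c ∈ cs', c ∈ pvCh bags b) →
          cs'.foldl (fun r c => pvGoA bags n c (PySem.Set.add r c)) res = res := by
        intro cs'
        induction cs' with
        | nil => intro _; rfl
        | cons c cs' ihc =>
          intro hsub
          have hcb : c ∈ pvCh bags b := hsub c (List.mem_cons_self ..)
          have hcres : c ∈ res := hb c (pvReaches.base hcb)
          have hblackc : pvBlack bags c res := fun y hy => hb y (pvReaches.step hcb hy)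
          simp only [List.foldl_cons, PySem.Set.add_of_mem hcres, ih c res hblackc]
          exact ihc (fun c' hc' => hsub c' (List.mem_cons_of_mem _ hc'))
      exact this cs (by rw [hcs]; exact fun c h => h)

-- proof-side recursive DFS with visited set (fuelled); pvLoopB is shown to trace it, and it is shown to trace pvGoA
def pvV (bags : List (String × List String)) : Nat → String → List String × List String → List String × List String
  | 0, _, st => st
  | n+1, b, st =>
    if PySem.Set.contains st.1 b then st
    else (pvCh bags b).foldl (fun st' c => pvV bags n c st')
           (PySem.Set.add st.1 b, PySem.Set.add st.2 b)

theorem pvFoldlV_congr {bags : List (String × List String)} {n m : Nat}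
    (cs : List String) (h : ∀ c ∈ cs, ∀ st, pvV bags n c st = pvV bags m c st) :
    ∀ st, cs.foldl (fun st' c => pvV bags n c st') st = cs.foldl (fun st' c => pvV bags m c st') st := by
  induction cs with
  | nil => intro st; rfl
  | cons c cs ih =>
    intro st
    simp only [List.foldl_cons, h c (List.mem_cons_self ..)]
    exact ih (fun c' hc' => h c' (List.mem_cons_of_mem _ hc')) _

theorem pvV_stable {bags : List (String × List String)} :
    ∀ (k : Nat) (b : String), pvSafeAt bags k b →
      ∀ (n m : Nat), k + 1 ≤ n → k + 1 ≤ m → ∀ st, pvV bags n b st = pvV bags m b st := by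
  intro k
  induction k with
  | zero =>
    intro b hb n m hn hm st
    obtain ⟨n', rfl⟩ : ∃ n', n = n' + 1 := ⟨n - 1, by omega⟩
    obtain ⟨m', rfl⟩ : ∃ m', m = m' + 1 := ⟨m - 1, by omega⟩
    have hch : pvCh bags b = [] := by
      rcases hb with hb | hb
      · cases hb
      · exact pvCh_of_not_key hb
    rw [pvV, pvV, hch]
    simp only [List.foldl_nil]
  | succ k ih =>
    intro b hb n m hn hm st
    obtain ⟨n', rfl⟩ : ∃ n', n = n' + 1 := ⟨n - 1, by omega⟩
    obtain ⟨m', rfl⟩ : ∃ m', m = m' + 1 := ⟨m - 1, by omega⟩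
    rw [pvV, pvV]
    by_cases hc : PySem.Set.contains st.1 b = true
    · rw [if_pos hc, if_pos hc]
    · rw [if_neg hc, if_neg hc]
      exact pvFoldlV_congr _ (fun c hcc st' =>
        ih c (pvSafeAt_child hb hcc) n' m' (by omega) (by omega) st') _

-- the explicit-stack loop traces the recursive DFS
theorem pvBridge {bags : List (String × List String)} (nn : Nat) :
    ∀ (stk : List String) (st : List String × List String),
      (∀ x ∈ stk, pvSafeAt bags nn x) →
      pvLoopB bags stk st = stk.foldl (fun st' b => pvV bags (nn+1) b st') st := by
  intro stk st
  induction stk, st using pvLoopB.induct bags with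
  | case1 st => intro _; rw [pvLoopB]; rfl
  | case2 st b stk' hb ih =>
    intro hsafe
    rw [pvLoopB, if_pos hb, List.foldl_cons]
    have hV : pvV bags (nn+1) b st = st := by rw [pvV, if_pos hb]
    rw [hV]
    exact ih (fun x hx => hsafe x (List.mem_cons_of_mem _ hx))
  | case3 st b stk' hb ih =>
    intro hsafe
    have hbsafe : pvSafeAt bags nn b := hsafe b (List.mem_cons_self ..)
    have hchsafe : ∀ c ∈ pvCh bags b, pvSafeAt bags nn c := by
      cases nn with
      | zero =>
        intro c hc
        rcases hbsafe with h | h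
        · cases h
        · rw [pvCh_of_not_key h] at hc; cases hc
      | succ k =>
        intro c hc
        exact pvSafeAt_mono (pvSafeAt_child hbsafe hc)
    have hch : (PySem.Dict.ofList bags).getD b [] = pvCh bags b := rfl
    have hstep := ih (by
      intro x hx
      rcases List.mem_append.mp hx with hx | hx
      · exact hchsafe x (hch ▸ hx)
      · exact hsafe x (List.mem_cons_of_mem _ hx))
    rw [pvLoopB, if_neg hb, List.foldl_cons, hstep, hch, List.foldl_append]
    have hV : pvV bags (nn+1) b st
        = (pvCh bags b).foldl (fun st' c => pvV bags nn c st')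
            (PySem.Set.add st.1 b, PySem.Set.add st.2 b) := by
      rw [pvV, if_neg hb]
    rw [hV]
    congr 1
    cases nn with
    | zero =>
      rcases hbsafe with h | h
      · cases h
      · rw [pvCh_of_not_key h]; simp only [List.foldl_nil]
    | succ k =>
      exact pvFoldlV_congr _ (fun c hc st' =>
        pvV_stable k c (pvSafeAt_child hbsafe hc) (k+2) (k+1) (by omega) (by omega) st') _

-- the recursive DFS with visited set traces A's memoless recursion
def pvP_single (bags : List (String × List String)) (n : Nat) : Prop :=
  ∀ (c : String) (seen res G : List String),
    pvSafeAt bags n c →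
    (∀ x ∈ seen, x ∈ G ∨ (x ∈ res ∧ pvBlack bags x res)) →
    (∀ x ∈ G, pvReaches bags x c) →
    (pvV bags (n+1) c (seen, res)).2 = pvGoA bags n c (PySem.Set.add res c) ∧
    (∀ y ∈ PySem.Set.add res c, y ∈ (pvV bags (n+1) c (seen, res)).2) ∧
    pvBlack bags c (pvV bags (n+1) c (seen, res)).2 ∧
    (∀ x ∈ (pvV bags (n+1) c (seen, res)).1,
      x ∈ G ∨ (x ∈ (pvV bags (n+1) c (seen, res)).2 ∧ pvBlack bags x (pvV bags (n+1) c (seen, res)).2))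

def pvP_fold (bags : List (String × List String)) (n : Nat) : Prop :=
  ∀ (cs seen res G : List String),
    (∀ d ∈ cs, pvSafeAt bags n d) →
    (∀ d ∈ cs, ∀ x ∈ G, pvReaches bags x d) →
    (∀ x ∈ seen, x ∈ G ∨ (x ∈ res ∧ pvBlack bags x res)) →
    (cs.foldl (fun st d => pvV bags (n+1) d st) (seen, res)).2
        = cs.foldl (fun r d => pvGoA bags n d (PySem.Set.add r d)) res ∧
    (∀ y ∈ res, y ∈ (cs.foldl (fun st d => pvV bags (n+1) d st) (seen, res)).2) ∧
    (∀ x ∈ (cs.foldl (fun st d => pvV bags (n+1) d st) (seen, res)).1,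
      x ∈ G ∨ (x ∈ (cs.foldl (fun st d => pvV bags (n+1) d st) (seen, res)).2
                ∧ pvBlack bags x (cs.foldl (fun st d => pvV bags (n+1) d st) (seen, res)).2)) ∧
    (∀ y, (∃ d ∈ cs, y = d ∨ pvReaches bags d y) →
      y ∈ (cs.foldl (fun st d => pvV bags (n+1) d st) (seen, res)).2)

theorem pvVA_fold_of {bags : List (String × List String)} {n : Nat}
    (hs : pvP_single bags n) : pvP_fold bags n := by
  intro cs
  induction cs with
  | nil =>
    intro seen res G _ _ hinv
    exact ⟨rfl, fun y hy => hy, hinv, by rintro y ⟨d, hd, -⟩; cases hd⟩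
  | cons d cs ih =>
    intro seen res G hsafe hgray hinv
    obtain ⟨E1, M1, B1, S1⟩ := hs d seen res G (hsafe d (List.mem_cons_self ..)) hinv
      (hgray d (List.mem_cons_self ..))
    have hd1 : d ∈ (pvV bags (n+1) d (seen, res)).2 :=
      M1 d ((PySem.Set.mem_add _ _ _).mpr (Or.inr rfl))
    obtain ⟨E2, M2, S2, C2⟩ := ih (pvV bags (n+1) d (seen, res)).1
      (pvV bags (n+1) d (seen, res)).2 G
      (fun d' hd' => hsafe d' (List.mem_cons_of_mem _ hd'))
      (fun d' hd' => hgray d' (List.mem_cons_of_mem _ hd'))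
      S1
    have efold : (d :: cs).foldl (fun st d => pvV bags (n+1) d st) (seen, res)
        = cs.foldl (fun st d => pvV bags (n+1) d st)
            ((pvV bags (n+1) d (seen, res)).1, (pvV bags (n+1) d (seen, res)).2) := by
      simp [List.foldl_cons]
    rw [efold]
    refine ⟨?_, ?_, S2, ?_⟩
    · simp only [List.foldl_cons, ← E1]
      exact E2
    · intro y hy
      exact M2 y (M1 y ((PySem.Set.mem_add _ _ _).mpr (Or.inl hy)))
    · rintro y ⟨d0, hd0, hy⟩
      rcases List.mem_cons.mp hd0 with rfl | hd0'
      · rcases hy with rfl | hy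
        · exact M2 y hd1
        · exact M2 y (B1 y hy)
      · exact C2 y ⟨d0, hd0', hy⟩

theorem pvVA_single {bags : List (String × List String)} : ∀ (n : Nat), pvP_single bags n := by
  intro n
  induction n with
  | zero =>
    intro c seen res G hsafe hinv hgray
    have hnoself : ¬ pvReaches bags c c := pvAcc_no_self (pvSafeAt_acc 0 c hsafe)
    have hch : pvCh bags c = [] := by
      rcases hsafe with h | h
      · cases h
      · exact pvCh_of_not_key h
    have hblack : ∀ res', pvBlack bags c res' := by
      intro res' y hy
      rcases pvReaches_inv hy with ⟨d, hd, -⟩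
      rw [hch] at hd; cases hd
    by_cases hc : PySem.Set.contains seen c = true
    · have hcmem : c ∈ seen := (PySem.Set.contains_iff _ _).mp hc
      have hcres : c ∈ res ∧ pvBlack bags c res := by
        rcases hinv c hcmem with h | h
        · exact absurd (hgray c h) hnoself
        · exact h
      have eV : pvV bags 1 c (seen, res) = (seen, res) := by rw [pvV, if_pos hc]
      rw [eV]
      have hadd : PySem.Set.add res c = res := PySem.Set.add_of_mem hcres.1
      refine ⟨?_, ?_, hcres.2, hinv⟩
      · show res = pvGoA bags 0 c (PySem.Set.add res c)
        rw [hadd]; rfl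
      · rw [hadd]; exact fun y hy => hy
    · have eV : pvV bags 1 c (seen, res) = (PySem.Set.add seen c, PySem.Set.add res c) := by
        rw [pvV, if_neg hc, hch, List.foldl_nil]
      rw [eV]
      refine ⟨rfl, fun y hy => hy, hblack _, ?_⟩
      intro x hx
      rcases (PySem.Set.mem_add _ _ _).mp hx with hx | rfl
      · rcases hinv x hx with h | h
        · exact Or.inl h
        · exact Or.inr ⟨(PySem.Set.mem_add _ _ _).mpr (Or.inl h.1),
            fun y hy => (PySem.Set.mem_add _ _ _).mpr (Or.inl (h.2 y hy))⟩
      · exact Or.inr ⟨(PySem.Set.mem_add _ _ _).mpr (Or.inr rfl), hblack _⟩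
  | succ n ih =>
    intro c seen res G hsafe hinv hgray
    have hfold := pvVA_fold_of ih
    have hnoself : ¬ pvReaches bags c c := pvAcc_no_self (pvSafeAt_acc (n+1) c hsafe)
    by_cases hc : PySem.Set.contains seen c = true
    · have hcmem : c ∈ seen := (PySem.Set.contains_iff _ _).mp hc
      have hcres : c ∈ res ∧ pvBlack bags c res := by
        rcases hinv c hcmem with h | h
        · exact absurd (hgray c h) hnoself
        · exact h
      have eV : pvV bags (n+2) c (seen, res) = (seen, res) := by rw [pvV, if_pos hc]
      rw [eV]
      have hadd : PySem.Set.add res c = res := PySem.Set.add_of_mem hcres.1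
      refine ⟨?_, ?_, hcres.2, hinv⟩
      · show res = pvGoA bags (n+1) c (PySem.Set.add res c)
        rw [hadd, pvGoA_noop (n+1) c res hcres.2]
      · rw [hadd]; exact fun y hy => hy
    · have eV : pvV bags (n+2) c (seen, res)
          = (pvCh bags c).foldl (fun st d => pvV bags (n+1) d st)
              (PySem.Set.add seen c, PySem.Set.add res c) := by
        rw [pvV, if_neg hc]
      have hinv' : ∀ x ∈ PySem.Set.add seen c,
          x ∈ c :: G ∨ (x ∈ PySem.Set.add res c ∧ pvBlack bags x (PySem.Set.add res c)) := by
        intro x hx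
        rcases (PySem.Set.mem_add _ _ _).mp hx with hx | rfl
        · rcases hinv x hx with h | h
          · exact Or.inl (List.mem_cons_of_mem _ h)
          · exact Or.inr ⟨(PySem.Set.mem_add _ _ _).mpr (Or.inl h.1),
              fun y hy => (PySem.Set.mem_add _ _ _).mpr (Or.inl (h.2 y hy))⟩
        · exact Or.inl (List.mem_cons_self ..)
      obtain ⟨E, M, S, C⟩ := hfold (pvCh bags c) (PySem.Set.add seen c) (PySem.Set.add res c)
        (c :: G)
        (fun d hd => pvSafeAt_child hsafe hd)
        (by
          intro d hd x hx
          rcases List.mem_cons.mp hx with rfl | hx'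
          · exact pvReaches.base hd
          · exact pvReaches_snoc (hgray x hx') hd)
        hinv'
      rw [eV]
      have hblackc : pvBlack bags c
          ((pvCh bags c).foldl (fun st d => pvV bags (n+1) d st)
            (PySem.Set.add seen c, PySem.Set.add res c)).2 := by
        intro y hy
        rcases pvReaches_inv hy with ⟨d, hd, hcase⟩
        exact C y ⟨d, hd, hcase⟩
      refine ⟨?_, M, hblackc, ?_⟩
      · rw [E]
        cases hg : (PySem.Dict.ofList bags).get? c with
        | none =>
          have hch0 : pvCh bags c = [] := by simp [pvCh, PySem.Dict.getD_eq_get?_getD, hg]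
          rw [hch0, List.foldl_nil]
          show _ = pvGoA bags (n+1) c (PySem.Set.add res c)
          rw [pvGoA, hg]
        | some cs =>
          have hchs : pvCh bags c = cs := by simp [pvCh, PySem.Dict.getD_eq_get?_getD, hg]
          rw [hchs]
          show _ = pvGoA bags (n+1) c (PySem.Set.add res c)
          rw [pvGoA, hg]
      · intro x hx
        rcases S x hx with h | h
        · rcases List.mem_cons.mp h with rfl | h'
          · exact Or.inr ⟨M x ((PySem.Set.mem_add _ _ _).mpr (Or.inr rfl)), hblackc⟩
          · exact Or.inl h'
        · exact Or.inr h

-- ===== VERDICT =====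
theorem getUniqueBags_spec : Claim_equal_getUniqueBags := by
  intro bags bag uniqueBags _ hpre
  unfold Spec_getUniqueBags getUniqueBags getUniqueBags_alt
  rcases hpre with hpre | hpre
  · -- bag is a safe key
    have hkey : bag ∈ pvKeys bags := by
      simp only [pvSafe, pvSafeStep, List.mem_filter] at hpre
      exact hpre.1
    have hsafe : pvSafeAt bags (bags.length + 1) bag := Or.inl hpre
    have hchsafe : ∀ x ∈ (PySem.Dict.ofList bags).getD bag [], pvSafeAt bags bags.length x :=
      fun x hx => pvSafeAt_child hsafe hx
    rw [pvBridge bags.length _ _ hchsafe]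
    obtain ⟨E, -, -, -⟩ := pvVA_fold_of (pvVA_single bags.length)
      ((PySem.Dict.ofList bags).getD bag []) PySem.Set.empty (uniqueBags.getD []) []
      hchsafe (by intro d _ x hx; cases hx)
      (by intro x hx; cases hx)
    rw [E]
    obtain ⟨v, hv⟩ : ∃ v, (PySem.Dict.ofList bags).get? bag = some v := by
      cases hg : (PySem.Dict.ofList bags).get? bag with
      | none => exact absurd ((PySem.Dict.get?_eq_none_iff_not_mem_keys _ _).mp hg) (fun h => h hkey)
      | some v => exact ⟨v, rfl⟩
    have hgd : (PySem.Dict.ofList bags).getD bag [] = v := by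
      simp [PySem.Dict.getD_eq_get?_getD, hv]
    rw [hgd, pvGoA, hv]
  · -- bag is not a key: both sides return uniqueBags unchanged
    have hg : (PySem.Dict.ofList bags).get? bag = none :=
      (PySem.Dict.get?_eq_none_iff_not_mem_keys _ _).mpr hpre
    have hgd : (PySem.Dict.ofList bags).getD bag [] = [] := pvGetD_of_not_key bags bag hpre
    rw [hgd, pvGoA, hg, pvLoopB]

@[simp] theorem getUniqueBags_raises : Claim_raises_getUniqueBags := by
  unfold Claim_raises_getUniqueBags
  constructor
  · intro bags bag uniqueBags _ hr hp
    rcases hp with hp | hp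
    · exact hr.2 hp
    · exact hp hr.1
  · refine ⟨by decide, by decide, ?_⟩
    show (pvLoopB [("a", ["a"])] ((PySem.Dict.ofList [("a", ["a"])]).getD "a" [])
        (PySem.Set.empty, (none : Option (List String)).getD [])).2 = ["a"]
    rw [show (PySem.Dict.ofList [("a", ["a"])]).getD "a" [] = ["a"] from by decide]
    rw [pvLoopB]
    rw [if_neg (by decide)]
    rw [show (PySem.Dict.ofList [("a", ["a"])]).getD "a" [] = ["a"] from by decide]
    simp only [List.append_nil]
    rw [pvLoopB]
    rw [if_pos (by decide)]
    rw [pvLoopB]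
    decide
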